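-- pv_equiv track=rewrite | github.com/Josrodjr/lenguajes_proyecto3 | p2/automata_builder/libs/tform.py | mov_DFA
-- ===== SOURCE A (Python) =====
-- def mov_DFA(transitions, states, character):
--     reachable_states = set()
--     # iterate over the transitions searching for reachable states of first state
--     for transition in transitions:
--         for state in states:
--             if transition[0] == state:
--                 # transition start is same as one of the eclosure
--                 if transition[1] == character:
--                     reachable_states.add(transition[2])
--
--     # iterate over the found reachable states until something changes
--     return reachable_states
-- ===== SOURCE B (Python) =====
-- def mov_DFA(transitions, states, character):
--     # Stage 1: index the transition table by input symbol (dict of lists).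
--     by_symbol = {}
--     for src, sym, dst in transitions:
--         by_symbol.setdefault(sym, []).append((src, dst))
--     # Stage 2: scan only the bucket for `character`, keeping destinations
--     # whose source lies in the given state set.
--     state_set = set(states)
--     reachable_states = set()
--     for src, dst in by_symbol.get(character, []):
--         if src in state_set:
--             reachable_states.add(dst)
--     return reachable_states
-- ===== Notes on version B (the rewrite author's own statement) =====
-- stated objective: faster
-- what changed: Replaces A's nested transitions-by-states rescan with two staged passes: first build a dict-of-lists index of the transitions keyed by input symbol, then scan only the bucket for the queried character, testing sources against a hash set of the given states.
import Mathlib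
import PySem

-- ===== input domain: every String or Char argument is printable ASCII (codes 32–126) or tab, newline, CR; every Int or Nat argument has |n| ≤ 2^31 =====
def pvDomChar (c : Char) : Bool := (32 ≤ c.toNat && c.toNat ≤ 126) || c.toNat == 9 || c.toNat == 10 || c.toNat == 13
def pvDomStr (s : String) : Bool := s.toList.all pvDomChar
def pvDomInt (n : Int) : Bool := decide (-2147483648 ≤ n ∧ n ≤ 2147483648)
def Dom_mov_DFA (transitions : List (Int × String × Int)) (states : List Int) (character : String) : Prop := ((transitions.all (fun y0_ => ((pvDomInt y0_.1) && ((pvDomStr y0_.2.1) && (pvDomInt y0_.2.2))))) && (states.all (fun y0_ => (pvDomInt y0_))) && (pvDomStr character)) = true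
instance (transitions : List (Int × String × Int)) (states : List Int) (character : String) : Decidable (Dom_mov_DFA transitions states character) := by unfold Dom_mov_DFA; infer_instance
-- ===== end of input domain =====

-- B stages the work: index the transitions by symbol into a dict of lists, then scan
-- only the queried character's bucket against a set of the states (avoids A's nested rescan).

-- ===== PORT A =====
def mov_DFA (transitions : List (Int × String × Int)) (states : List Int) (character : String) : List Int :=
  -- reachable_states = set(); for transition in transitions: for state in states: …
  transitions.foldl (fun reachable transition =>
    states.foldl (fun reachable state =>
      if transition.1 = state then
        (if transition.2.1 = character then PySem.Set.add reachable transition.2.2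
         else reachable)
      else reachable) reachable)
    (PySem.Set.empty)

-- ===== PORT B =====
def mov_DFA_alt (transitions : List (Int × String × Int)) (states : List Int) (character : String) : List Int :=
  -- by_symbol = {}; for src, sym, dst in transitions: by_symbol.setdefault(sym, []).append((src, dst))
  let bySymbol : PySem.Dict String (List (Int × Int)) :=
    transitions.foldl (fun d t => d.modify t.2.1 [] (· ++ [(t.1, t.2.2)])) PySem.Dict.empty
  -- state_set = set(states)
  let stateSet : PySem.Set Int := PySem.Set.ofList states
  -- reachable_states = set(); for src, dst in by_symbol.get(character, []): if src in state_set: add dst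
  (bySymbol.getD character []).foldl (fun reachable p =>
    if PySem.Set.contains stateSet p.1 then PySem.Set.add reachable p.2 else reachable)
    (PySem.Set.empty)

-- ===== PRECONDITION & SPEC =====
def Spec_mov_DFA (transitions : List (Int × String × Int)) (states : List Int) (character : String) (out : List Int) : Prop := out = mov_DFA_alt transitions states character
instance (transitions : List (Int × String × Int)) (states : List Int) (character : String) (out : List Int) : Decidable (Spec_mov_DFA transitions states character out) := by unfold Spec_mov_DFA; infer_instance

-- ===== CLAIM (what is proved, stated in full; the proofs are below) =====
def Claim_equal_mov_DFA : Prop := ∀ (transitions : List (Int × String × Int)) (states : List Int) (character : String), Dom_mov_DFA transitions states character → Spec_mov_DFA transitions states character (mov_DFA transitions states character)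

-- ===== LEMMAS AND PROOFS =====

-- A's inner loop over `states`: adds transition.2.2 exactly when some state matches
-- the source (and the symbol matches); idempotent thanks to Set.add.
theorem inner_loop_eq (t : Int × String × Int) (character : String)
    (states : List Int) (acc : PySem.Set Int) :
    states.foldl (fun reachable state =>
      if t.1 = state then
        (if t.2.1 = character then PySem.Set.add reachable t.2.2 else reachable)
      else reachable) acc
    = if t.1 ∈ states ∧ t.2.1 = character then PySem.Set.add acc t.2.2 else acc := by
  induction states generalizing acc with
  | nil => simp
  | cons s rest ih =>
    simp only [List.foldl_cons, ih, List.mem_cons]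
    by_cases h1 : t.1 = s
    · by_cases h2 : t.2.1 = character
      · simp [h1, h2]
      · simp [h1, h2]
    · by_cases h2 : t.1 ∈ rest <;> simp [h1, h2]

-- Folding a guarded add over a filtered list = one fold over the whole list with both guards.
theorem foldl_filter_guard (q c : (Int × String × Int) → Bool)
    (l : List (Int × String × Int)) (s : PySem.Set Int) :
    (l.filter q).foldl (fun acc t => if c t then PySem.Set.add acc t.2.2 else acc) s
    = l.foldl (fun acc t => if q t && c t then PySem.Set.add acc t.2.2 else acc) s := by
  induction l generalizing s with
  | nil => rfl
  | cons t rest ih =>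
    by_cases hq : q t
    · by_cases hc : c t <;> simp [hq, hc, ih]
    · simp [hq, ih]

-- A's two nested loops collapse to one fold with the combined guard.
theorem A_eq (transitions : List (Int × String × Int)) (states : List Int) (character : String) :
    mov_DFA transitions states character
    = transitions.foldl (fun acc t =>
        if (t.2.1 == character) && PySem.Set.contains (PySem.Set.ofList states) t.1
        then PySem.Set.add acc t.2.2 else acc) PySem.Set.empty := by
  unfold mov_DFA
  have hfun : (fun (reachable : PySem.Set Int) (transition : Int × String × Int) =>
      states.foldl (fun reachable state =>
        if transition.1 = state then
          (if transition.2.1 = character then PySem.Set.add reachable transition.2.2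
           else reachable)
        else reachable) reachable)
      = (fun acc t =>
          if (t.2.1 == character) && PySem.Set.contains (PySem.Set.ofList states) t.1
          then PySem.Set.add acc t.2.2 else acc) := by
    funext acc t
    rw [inner_loop_eq]
    by_cases h1 : t.2.1 = character <;> by_cases h2 : t.1 ∈ states <;>
      simp [h1, h2, PySem.Set.mem_ofList]
  rw [hfun]

-- B's staged passes (symbol index, then the character's bucket) collapse to the same fold.
theorem B_eq (transitions : List (Int × String × Int)) (states : List Int) (character : String) :
    mov_DFA_alt transitions states character
    = transitions.foldl (fun acc t =>
        if (t.2.1 == character) && PySem.Set.contains (PySem.Set.ofList states) t.1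
        then PySem.Set.add acc t.2.2 else acc) PySem.Set.empty := by
  simp only [mov_DFA_alt]
  rw [show transitions.foldl (fun d t => d.modify t.2.1 [] (· ++ [(t.1, t.2.2)])) PySem.Dict.empty
        = (transitions.map (fun t => (t.2.1, (t.1, t.2.2)))).foldl
            (fun d p => d.modify p.1 [] (· ++ [p.2])) PySem.Dict.empty
      from (List.foldl_map (f := fun t : Int × String × Int => (t.2.1, (t.1, t.2.2)))
        (g := fun (d : PySem.Dict String (List (Int × Int))) p => d.modify p.1 [] (· ++ [p.2]))).symm]
  rw [PySem.Dict.getD_foldl_modify_append, PySem.Dict.getD_empty, List.nil_append,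
      List.filter_map, List.map_map, List.foldl_map]
  exact foldl_filter_guard _ _ _ _

-- ===== VERDICT (by name: the statement is the Claim_ definition above) =====
theorem mov_DFA_spec : Claim_equal_mov_DFA := by
  intro transitions states character _
  unfold Spec_mov_DFA
  rw [A_eq, B_eq]
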